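-- pv_equiv track=rewrite | github.com/mono-ball/MonoBall-v2 | porycon2/porycon/definition_converter.py | _normalize_id_component
-- ===== SOURCE A (Python) =====
-- def _normalize_id_component(value: str) -> str:
--     """Normalize a string to a valid ID component (lowercase, underscores, alphanumeric)."""
--     if not value:
--         return "unknown"
--     # Replace spaces and hyphens with underscores, keep alphanumeric and underscores, lowercase
--     result = ""
--     for c in value.lower():
--         if c.isalnum():
--             result += c
--         elif c in (' ', '-', '_'):
--             if result and result[-1] != '_':
--                 result += '_'
--     # Strip trailing underscore
--     return result.rstrip('_') or "unknown"
-- ===== SOURCE B (Python) =====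
-- def _normalize_id_component(value: str) -> str:
--     """Normalize a string to a valid ID component (lowercase, underscores, alphanumeric)."""
--     if not value:
--         return "unknown"
--     # Map each char: keep alphanumerics, turn separators into spaces, drop the rest;
--     # then let str.split() collapse/trim the separator runs and join with underscores.
--     marked = "".join(
--         c if c.isalnum() else (" " if c in " -_" else "")
--         for c in value.lower()
--     )
--     return "_".join(marked.split()) or "unknown"
-- ===== Notes on version B (the rewrite author's own statement) =====
-- stated objective: simpler
-- what changed: Replaces A's stateful character-by-character accumulator (which checks the last emitted character to avoid duplicate/leading separators, plus a final rstrip) with a two-pass pipeline: map each character to itself, a space, or nothing, then let str.split() collapse and trim the separator runs and join the words with underscores.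
import Mathlib
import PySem

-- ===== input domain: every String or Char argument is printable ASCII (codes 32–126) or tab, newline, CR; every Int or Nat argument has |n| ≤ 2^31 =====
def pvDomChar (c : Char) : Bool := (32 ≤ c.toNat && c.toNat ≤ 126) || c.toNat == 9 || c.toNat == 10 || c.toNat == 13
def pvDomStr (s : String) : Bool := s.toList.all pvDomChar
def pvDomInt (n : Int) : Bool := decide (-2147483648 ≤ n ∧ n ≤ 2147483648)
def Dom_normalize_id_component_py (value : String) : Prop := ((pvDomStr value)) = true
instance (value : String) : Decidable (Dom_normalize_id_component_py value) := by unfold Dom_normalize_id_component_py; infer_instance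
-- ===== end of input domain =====

-- B replaces A's stateful char-by-char accumulator (last-char bookkeeping + final rstrip)
-- with a map / split() / '_'.join() pipeline; same return value, objective: simpler.

-- ===== PORT A =====
-- A's loop body: append alnum chars; on ' '/'-'/'_' append '_' only if result is
-- nonempty and does not already end in '_' (result[-1] ported as pyGet? result (-1)).
def pvStepA (result : List Char) (c : Char) : List Char :=
  if PySem.Chars.isalnum c then result ++ [c]
  else if c == ' ' || c == '-' || c == '_' then
    if !result.isEmpty && PySem.List.pyGet? result (-1) != some '_' then result ++ ['_'] else result
  else result

-- hand port of str.rstrip('_') (exact: drop trailing '_'; PySem.Chars.rstrip is the whitespace form)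
def pvRstrip (l : List Char) : List Char := (l.reverse.dropWhile (fun c => c == '_')).reverse

def normalize_id_component_py (value : String) : String :=
  if value.toList.isEmpty then "unknown"
  else
    let result := (PySem.Str.lower value).toList.foldl pvStepA []
    let stripped := pvRstrip result
    if stripped.isEmpty then "unknown" else String.ofList stripped

-- ===== PORT B =====
-- B's per-char map: keep alnum, separators become ' ', everything else is dropped.
def pvMapB (c : Char) : List Char :=
  if PySem.Chars.isalnum c then [c]
  else if c == ' ' || c == '-' || c == '_' then [' ']
  else []

def normalize_id_component_py_alt (value : String) : String :=
  if value.toList.isEmpty then "unknown"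
  else
    let marked := (PySem.Str.lower value).toList.flatMap pvMapB
    let joined := PySem.Chars.join ['_'] (PySem.Chars.split₀ marked)
    if joined.isEmpty then "unknown" else String.ofList joined

-- ===== PRECONDITION & SPEC =====
def Spec_normalize_id_component_py (value : String) (out : String) : Prop := out = normalize_id_component_py_alt value
instance (value : String) (out : String) : Decidable (Spec_normalize_id_component_py value out) := by unfold Spec_normalize_id_component_py; infer_instance

-- ===== CLAIM (what is proved, stated in full; the proofs are below) =====
def Claim_equal_normalize_id_component_py : Prop := ∀ (value : String), Dom_normalize_id_component_py value → Spec_normalize_id_component_py value (normalize_id_component_py value)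

-- ===== LEMMAS AND PROOFS =====

-- A's emitter, state made explicit: st = "result nonempty", lu = "result ends in '_'".
def pvEz : List Char → Bool → Bool → List Char
  | [], _, _ => []
  | c :: cs, st, lu =>
    if PySem.Chars.isalnum c then c :: pvEz cs true false
    else if c == ' ' || c == '-' || c == '_' then
      if st && !lu then '_' :: pvEz cs true true else pvEz cs st lu
    else pvEz cs st lu

-- B's emitter: st = "a word was already emitted", pd = "a separator is pending".
def pvLz : List Char → Bool → Bool → List Char
  | [], _, _ => []
  | c :: cs, st, pd =>
    if PySem.Chars.isalnum c then (if st && pd then ['_'] else []) ++ c :: pvLz cs true false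
    else if c == ' ' || c == '-' || c == '_' then pvLz cs st true
    else pvLz cs st pd

-- '_'.join as a plain recursion
def pvJ : List (List Char) → List Char
  | [] => []
  | [w] => w
  | w :: ws => w ++ '_' :: pvJ ws

theorem pv_alnum_not_space (c : Char) (h : PySem.Chars.isalnum c = true) :
    PySem.Chars.isspace c = false := by
  simp [PySem.Chars.isalnum, PySem.Chars.isalpha, PySem.Chars.isdigit,
    PySem.Chars.isupper, PySem.Chars.islower, Char.le_def, UInt32.le_iff_toNat_le] at h
  rw [show PySem.Chars.isspace c = (decide (c.toNat = 32) || decide (9 ≤ c.toNat) && decide (c.toNat ≤ 13) || decide (28 ≤ c.toNat) && decide (c.toNat ≤ 31) || decide (c.toNat = 133) || decide (c.toNat = 160) || decide (c.toNat = 5760) || decide (8192 ≤ c.toNat) && decide (c.toNat ≤ 8202) || decide (c.toNat = 8232) || decide (c.toNat = 8233) || decide (c.toNat = 8239) || decide (c.toNat = 8287) || decide (c.toNat = 12288)) from rfl]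
  simp only [Bool.or_eq_false_iff, Bool.and_eq_false_iff, decide_eq_false_iff_not, Nat.not_le]
  omega

theorem pv_alnum_ne_underscore (c : Char) (h : PySem.Chars.isalnum c = true) : c ≠ '_' := by
  rintro rfl; exact absurd h (by decide)

theorem pv_pyGet_neg_one_concat {α : Type} (l : List α) (a : α) :
    PySem.List.pyGet? (l ++ [a]) (-1) = some a := by
  simp [PySem.List.pyGet?, PySem.List.pyIdx?]

theorem pv_foldl_eq_ez (cs : List Char) : ∀ r : List Char,
    cs.foldl pvStepA r = r ++ pvEz cs (!r.isEmpty) (PySem.List.pyGet? r (-1) == some '_') := by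
  induction cs with
  | nil => intro r; simp [pvEz]
  | cons c cs ih =>
    intro r
    rw [List.foldl_cons]
    by_cases hal : PySem.Chars.isalnum c = true
    · have hne : c ≠ '_' := pv_alnum_ne_underscore c hal
      have hstep : pvStepA r c = r ++ [c] := by simp [pvStepA, hal]
      rw [hstep, ih, pv_pyGet_neg_one_concat]
      have he : (r ++ [c]).isEmpty = false := by cases r <;> rfl
      have hc : (c == '_') = false := by simpa using hne
      simp [pvEz, hal, he, hc]
    · have hal' : PySem.Chars.isalnum c = false := by simpa using hal
      by_cases hsep : (c == ' ' || c == '-' || c == '_') = true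
      · by_cases hemit : (!r.isEmpty && PySem.List.pyGet? r (-1) != some '_') = true
        · obtain ⟨h1, h2⟩ := Bool.and_eq_true_iff.mp hemit
          have hstep : pvStepA r c = r ++ ['_'] := by simp [pvStepA, hal', hsep, hemit]
          have h2' : (PySem.List.pyGet? r (-1) == some '_') = false := by simpa using h2
          rw [hstep, ih, pv_pyGet_neg_one_concat]
          have he : (r ++ ['_']).isEmpty = false := by cases r <;> rfl
          simp [pvEz, hal', hsep, he, h1, h2']
        · have hemit' : (!r.isEmpty && PySem.List.pyGet? r (-1) != some '_') = false := by
            simpa using hemit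
          have hstep : pvStepA r c = r := by simp [pvStepA, hal', hsep, hemit']
          rw [hstep, ih]
          have : (!r.isEmpty && !(PySem.List.pyGet? r (-1) == some '_')) = false := by
            simpa using hemit'
          simp [pvEz, hal', hsep, this]
      · have hsep' : (c == ' ' || c == '-' || c == '_') = false := by simpa using hsep
        have hstep : pvStepA r c = r := by simp [pvStepA, hal', hsep']
        rw [hstep, ih]
        simp [pvEz, hal', hsep']

theorem pv_rstrip_cons_ne (c : Char) (X : List Char) (h : c ≠ '_') :
    pvRstrip (c :: X) = c :: pvRstrip X := by
  simp only [pvRstrip, List.reverse_cons, List.dropWhile_append]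
  split_ifs with h1
  · have : (c == '_') = false := by simpa using h
    simp [List.dropWhile_cons, this, List.isEmpty_iff.mp h1]
  · simp

theorem pv_rstrip_cons_underscore (X : List Char) :
    pvRstrip ('_' :: X) = if (pvRstrip X).isEmpty then [] else '_' :: pvRstrip X := by
  by_cases h : List.dropWhile (fun c => c == '_') X.reverse = []
  · simp [pvRstrip, List.dropWhile_append, h]
  · simp [pvRstrip, List.dropWhile_append, h]

theorem pv_lz_false_pd (cs : List Char) : ∀ pd pd', pvLz cs false pd = pvLz cs false pd' := by
  induction cs with
  | nil => intros; rfl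
  | cons c cs ih =>
    intro pd pd'
    by_cases hal : PySem.Chars.isalnum c = true
    · simp [pvLz, hal]
    · by_cases hsep : (c == ' ' || c == '-' || c == '_') = true
      · simp [pvLz, hal, hsep]
      · simp [pvLz, hal, hsep, ih pd pd']

theorem pv_rstrip_ez (cs : List Char) :
    (∀ st, pvRstrip (pvEz cs st false) = pvLz cs st false) ∧
    pvRstrip ('_' :: pvEz cs true true) = pvLz cs true true := by
  induction cs with
  | nil => constructor <;> simp [pvEz, pvLz, pvRstrip]
  | cons c cs ih =>
    obtain ⟨ih1, ih2⟩ := ih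
    by_cases hal : PySem.Chars.isalnum c = true
    · have hne : c ≠ '_' := pv_alnum_ne_underscore c hal
      constructor
      · intro st
        simp only [pvEz, pvLz, hal, if_true, pv_rstrip_cons_ne c _ hne, ih1 true]
        simp
      · have hy : pvRstrip (c :: pvEz cs true false) = c :: pvRstrip (pvEz cs true false) :=
          pv_rstrip_cons_ne c _ hne
        simp only [pvEz, pvLz, hal, if_true, pv_rstrip_cons_underscore, hy, ih1 true]
        simp
    · have hal' : PySem.Chars.isalnum c = false := by simpa using hal
      by_cases hsep : (c == ' ' || c == '-' || c == '_') = true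
      · constructor
        · intro st
          cases st with
          | true =>
            have he : pvEz (c :: cs) true false = '_' :: pvEz cs true true := by
              simp [pvEz, hal', hsep]
            have hl : pvLz (c :: cs) true false = pvLz cs true true := by
              simp [pvLz, hal', hsep]
            rw [he, hl, ih2]
          | false =>
            have he : pvEz (c :: cs) false false = pvEz cs false false := by
              simp [pvEz, hal', hsep]
            have hl : pvLz (c :: cs) false false = pvLz cs false true := by
              simp [pvLz, hal', hsep]
            rw [he, hl, ih1 false, pv_lz_false_pd cs false true]
        · have he : pvEz (c :: cs) true true = pvEz cs true true := by
            simp [pvEz, hal', hsep]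
          have hl : pvLz (c :: cs) true true = pvLz cs true true := by
            simp [pvLz, hal', hsep]
          rw [he, hl, ih2]
      · have hsep' : (c == ' ' || c == '-' || c == '_') = false := by simpa using hsep
        constructor
        · intro st
          simp only [pvEz, pvLz, hal', hsep', Bool.false_eq_true, if_false, ih1 st]
        · simp only [pvEz, pvLz, hal', hsep', Bool.false_eq_true, if_false, ih2]

theorem pv_join_eq_pvJ (ws : List (List Char)) : PySem.Chars.join ['_'] ws = pvJ ws := by
  induction ws with
  | nil => rfl
  | cons w ws ih =>
    cases ws with
    | nil => simp [PySem.Chars.join, pvJ, List.intercalate]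
    | cons w' ws' =>
      simp only [pvJ, ← ih]
      simp [PySem.Chars.join, List.intercalate, List.intersperse]

theorem pv_pvJ_snoc (ws : List (List Char)) (w : List Char) :
    pvJ (ws ++ [w]) = if ws.isEmpty then w else pvJ ws ++ '_' :: w := by
  induction ws with
  | nil => simp [pvJ]
  | cons x xs ih =>
    cases xs with
    | nil => simp [pvJ]
    | cons y ys =>
      have e : ∀ (a b : List Char) (zs : List (List Char)),
          pvJ (a :: b :: zs) = a ++ '_' :: pvJ (b :: zs) := fun _ _ _ => rfl
      rw [List.cons_append, List.cons_append, e, ← List.cons_append, ih]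
      simp [e]

theorem pv_go_spec (cs : List Char) : ∀ (cur : List Char) (acc : List (List Char)),
    pvJ (PySem.Chars.split₀.go (cs.flatMap pvMapB) cur acc) =
      pvJ (acc.reverse ++ (if cur.isEmpty then [] else [cur.reverse])) ++
        pvLz cs (!(acc.isEmpty && cur.isEmpty)) cur.isEmpty := by
  induction cs with
  | nil =>
    intro cur acc
    cases cur <;> simp [PySem.Chars.split₀.go, pvLz]
  | cons c cs ih =>
    intro cur acc
    by_cases hal : PySem.Chars.isalnum c = true
    · have hns : PySem.Chars.isspace c = false := pv_alnum_not_space c hal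
      have hm : (c :: cs).flatMap pvMapB = c :: cs.flatMap pvMapB := by
        simp [pvMapB, hal]
      rw [hm]
      rw [show PySem.Chars.split₀.go (c :: cs.flatMap pvMapB) cur acc
            = PySem.Chars.split₀.go (cs.flatMap pvMapB) (c :: cur) acc by
        simp [PySem.Chars.split₀.go, hns]]
      rw [ih (c :: cur) acc]
      rw [show pvLz (c :: cs) (!(acc.isEmpty && cur.isEmpty)) cur.isEmpty
            = (if !(acc.isEmpty && cur.isEmpty) && cur.isEmpty then ['_'] else []) ++
              c :: pvLz cs true false by simp [pvLz, hal]]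
      cases cur with
      | nil =>
        cases acc with
        | nil => simp [pvJ]
        | cons a as =>
          simp only [List.isEmpty_cons, List.isEmpty_nil, Bool.and_true, Bool.and_false,
            Bool.not_false, List.reverse_nil, List.reverse_cons, Bool.false_eq_true,
            if_false, if_true]
          rw [show (as.reverse ++ [a] ++ [[] ++ [c]] : List (List Char))
                = (as.reverse ++ [a]) ++ [[c]] by simp]
          rw [pv_pvJ_snoc]
          simp
      | cons d ds =>
        simp only [List.isEmpty_cons, Bool.and_false, List.reverse_cons, Bool.not_false,
          Bool.false_eq_true, if_false]
        rw [pv_pvJ_snoc, pv_pvJ_snoc]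
        split_ifs <;> simp
    · have hal' : PySem.Chars.isalnum c = false := by simpa using hal
      by_cases hsep : (c == ' ' || c == '-' || c == '_') = true
      · have hm : (c :: cs).flatMap pvMapB = ' ' :: cs.flatMap pvMapB := by
          simp [pvMapB, hal', hsep]
        rw [hm]
        have hlz : pvLz (c :: cs) (!(acc.isEmpty && cur.isEmpty)) cur.isEmpty
            = pvLz cs (!(acc.isEmpty && cur.isEmpty)) true := by simp [pvLz, hal', hsep]
        rw [hlz]
        cases cur with
        | nil =>
          rw [show PySem.Chars.split₀.go (' ' :: cs.flatMap pvMapB) [] acc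
                = PySem.Chars.split₀.go (cs.flatMap pvMapB) [] acc by
            simp [PySem.Chars.split₀.go, show PySem.Chars.isspace ' ' = true from by decide]]
          rw [ih [] acc]
          simp
        | cons d ds =>
          rw [show PySem.Chars.split₀.go (' ' :: cs.flatMap pvMapB) (d :: ds) acc
                = PySem.Chars.split₀.go (cs.flatMap pvMapB) [] ((d :: ds).reverse :: acc) by
            simp [PySem.Chars.split₀.go, show PySem.Chars.isspace ' ' = true from by decide]]
          rw [ih [] ((d :: ds).reverse :: acc)]
          simp [pv_pvJ_snoc]
      · have hsep' : (c == ' ' || c == '-' || c == '_') = false := by simpa using hsep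
        have hm : (c :: cs).flatMap pvMapB = cs.flatMap pvMapB := by
          simp [pvMapB, hal', hsep']
        rw [hm, ih cur acc]
        rw [show pvLz (c :: cs) (!(acc.isEmpty && cur.isEmpty)) cur.isEmpty
              = pvLz cs (!(acc.isEmpty && cur.isEmpty)) cur.isEmpty by simp [pvLz, hal', hsep']]

theorem pv_sides_eq (cs : List Char) :
    pvRstrip (cs.foldl pvStepA []) =
      PySem.Chars.join ['_'] (PySem.Chars.split₀ (cs.flatMap pvMapB)) := by
  rw [pv_foldl_eq_ez cs []]
  have h0 : (!([] : List Char).isEmpty) = false := rfl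
  have h1 : (PySem.List.pyGet? ([] : List Char) (-1) == some '_') = false := rfl
  rw [List.nil_append, h0, h1, (pv_rstrip_ez cs).1 false]
  rw [pv_join_eq_pvJ, PySem.Chars.split₀, pv_go_spec cs [] []]
  simp [pvJ, pv_lz_false_pd cs true false]

-- ===== VERDICT (by name: the statement is the Claim_ definition above) =====
theorem normalize_id_component_py_spec : Claim_equal_normalize_id_component_py := by
  intro value _
  unfold Spec_normalize_id_component_py normalize_id_component_py normalize_id_component_py_alt
  by_cases hv : value.toList.isEmpty
  · simp [hv]
  · simp only [hv, Bool.false_eq_true, if_false]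
    rw [pv_sides_eq (PySem.Str.lower value).toList]
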